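-- pv_equiv track=rewrite | github.com/lollipop690/SC1003-Mini-Project | modify_data.py | school_score
-- ===== SOURCE A (Python) =====
-- def school_score(students): #grades how diverse each group is(lower better)
--     score = 0
--     school_counts = {}
--
--     for student in students:
--         school_counts[student['School']] = school_counts.get(student['School'], 0) + 1
--
--     for count in school_counts.values():
--         if count >= 2:
--             score += (count - 2) * 10 #every 2nd person onwards of the same school will add 10 to the diversity score
--
--     return score
-- ===== SOURCE B (Python) =====
-- def school_score(students):
--     # Closed form: a school with c students contributes (c-2)*10 for c>=2, i.e.
--     # 10*(c - 1 - [c>=2]); summed over schools this is 10*(n - #distinct - #repeated).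
--     seen = set()
--     repeated = set()
--     for student in students:
--         name = student['School']
--         if name in seen:
--             repeated.add(name)
--         else:
--             seen.add(name)
--     return 10 * (len(students) - len(seen) - len(repeated))
-- ===== Notes on version B (the rewrite author's own statement) =====
-- stated objective: alternative
-- what changed: B never builds per-school counts: it tracks two sets (schools seen, schools seen at least twice) and returns the closed form 10*(n - |seen| - |repeated|), which equals A's sum of (count-2)*10 over schools with count>=2.
import Mathlib
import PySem

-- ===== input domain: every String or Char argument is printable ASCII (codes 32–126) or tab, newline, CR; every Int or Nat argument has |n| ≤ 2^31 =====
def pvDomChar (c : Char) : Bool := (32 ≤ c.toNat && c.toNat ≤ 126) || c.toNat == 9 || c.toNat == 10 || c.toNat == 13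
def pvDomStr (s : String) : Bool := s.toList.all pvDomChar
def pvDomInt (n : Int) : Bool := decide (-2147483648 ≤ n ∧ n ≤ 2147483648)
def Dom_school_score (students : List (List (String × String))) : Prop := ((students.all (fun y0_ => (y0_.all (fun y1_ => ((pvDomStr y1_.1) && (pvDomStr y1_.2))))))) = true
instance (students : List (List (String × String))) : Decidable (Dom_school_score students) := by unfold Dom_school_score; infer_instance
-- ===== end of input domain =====

-- B drops A's counts dict: it tracks the set of seen schools and the set of repeated schools and returns the closed form 10*(n - |seen| - |repeated|) (alternative algorithm; same O(n) cost).


-- ===== PORT A =====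
-- student['School']: first-match lookup; the .getD "" default is unreachable under Pre_ (Python raises KeyError there)
def school_score (students : List (List (String × String))) : Int :=
  (PySem.Dict.values (students.foldl
    (fun school_counts student =>
      school_counts.insert (((PySem.Dict.mk student).get? "School").getD "")
        (school_counts.getD (((PySem.Dict.mk student).get? "School").getD "") 0 + 1))
    (PySem.Dict.empty : PySem.Dict String Int))).foldl
    (fun score count => if count ≥ 2 then score + (count - 2) * 10 else score) 0

-- ===== PORT B =====
def school_score_alt (students : List (List (String × String))) : Int :=
  let st := students.foldl
    (fun st student =>
      let name := ((PySem.Dict.mk student).get? "School").getD ""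
      if PySem.Set.contains st.1 name then (st.1, PySem.Set.add st.2 name)
      else (PySem.Set.add st.1 name, st.2))
    (([] : PySem.Set String), ([] : PySem.Set String))
  10 * ((students.length : Int) - PySem.Set.len st.1 - PySem.Set.len st.2)

-- ===== PRECONDITION & SPEC =====
-- Pre_ excludes exactly the inputs where some student has no 'School' key: there Python A raises KeyError.
def Pre_school_score (students : List (List (String × String))) : Prop :=
  (students.all (fun student => (PySem.Dict.mk student).contains "School")) = true
instance (students : List (List (String × String))) : Decidable (Pre_school_score students) := by
  unfold Pre_school_score; infer_instance
def pvWitness_school_score : (List (List (String × String))) :=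
  [[("School", "NTU"), ("Name", "a")], [("School", "NUS")], [("School", "NTU")]]

def Spec_school_score (students : List (List (String × String))) (out : Int) : Prop := out = school_score_alt students
instance (students : List (List (String × String))) (out : Int) : Decidable (Spec_school_score students out) := by unfold Spec_school_score; infer_instance

-- ===== CLAIM (what is proved, stated in full; the proofs are below) =====
def Claim_equal_school_score : Prop := ∀ (students : List (List (String × String))), Dom_school_score students → Pre_school_score students → Spec_school_score students (school_score students)

-- ===== LEMMAS AND PROOFS =====

-- the school name A and B both look up for a student
def pvKey (student : List (String × String)) : String :=
  ((PySem.Dict.mk student).get? "School").getD ""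

-- A's per-count contribution
def pvG (c : Int) : Int := if c ≥ 2 then (c - 2) * 10 else 0

-- A's total as a function of the list of school names
def pvM (ks : List String) : Int :=
  ((PySem.Set.ofList ks).map (fun k => pvG (ks.count k : Int))).sum

-- B's loop body over school names
def pvStep (st : PySem.Set String × PySem.Set String) (x : String) :
    PySem.Set String × PySem.Set String :=
  if PySem.Set.contains st.1 x then (st.1, PySem.Set.add st.2 x)
  else (PySem.Set.add st.1 x, st.2)

theorem pvSumG (l : List Int) (s : Int) :
    l.foldl (fun score count => if count ≥ 2 then score + (count - 2) * 10 else score) s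
      = s + (l.map pvG).sum := by
  induction l generalizing s with
  | nil => simp
  | cons c t ih => simp only [List.foldl_cons, List.map_cons, List.sum_cons, ih]
                   unfold pvG; split_ifs <;> ring

theorem pvM_append (ks : List String) (x : String) :
    pvM (ks ++ [x]) = if (ks.count x : Int) + 1 ≥ 3 then pvM ks + 10 else pvM ks := by
  unfold pvM
  rw [PySem.Set.ofList_append_singleton, PySem.Set.add_eq_ite]
  have hc_ne : ∀ k, k ≠ x → ((ks ++ [x]).count k : Int) = (ks.count k : Int) := by
    intro k hk
    have hxk : ¬ x = k := fun h => hk h.symm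
    simp [List.count_append, hxk]
  by_cases hx : x ∈ PySem.Set.ofList ks
  · rw [if_pos hx]
    have hnd := PySem.Set.nodup_ofList (xs := ks)
    have hperm := List.perm_cons_erase hx
    have hsum : ∀ (f : String → Int),
        ((PySem.Set.ofList ks).map f).sum
          = f x + (((PySem.Set.ofList ks).erase x).map f).sum := by
      intro f
      rw [(hperm.map f).sum_eq]
      simp
    rw [hsum, hsum]
    have herase : (((PySem.Set.ofList ks).erase x).map (fun k => pvG (((ks ++ [x]).count k : Int)))).sum
        = (((PySem.Set.ofList ks).erase x).map (fun k => pvG ((ks.count k : Int)))).sum := by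
      apply congrArg
      apply List.map_congr_left
      intro k hk
      rw [hc_ne k ((hnd.mem_erase_iff.mp hk).1)]
    rw [herase]
    have hcx : ((ks ++ [x]).count x : Int) = (ks.count x : Int) + 1 := by
      simp [List.count_append]
    rw [hcx]
    unfold pvG; split_ifs <;> omega
  · rw [if_neg hx]
    have hxks : x ∉ ks := fun h => hx ((PySem.Set.mem_ofList ks x).mpr h)
    have hcnt0 : ks.count x = 0 := List.count_eq_zero.mpr hxks
    have hmain : ((PySem.Set.ofList ks).map (fun k => pvG (((ks ++ [x]).count k : Int)))).sum
        = ((PySem.Set.ofList ks).map (fun k => pvG ((ks.count k : Int)))).sum := by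
      apply congrArg
      apply List.map_congr_left
      intro k hk
      have : k ≠ x := by
        intro h; subst h; exact hx hk
      rw [hc_ne k this]
    have hcx : ((ks ++ [x]).count x : Int) = 1 := by
      simp [List.count_append, hcnt0]
    rw [List.map_append, List.sum_append, hmain, List.map_singleton, List.sum_singleton, hcx]
    simp [hcnt0, pvG]

-- invariant of B's single pass over the school names
theorem pvB_fold (ks : List String) :
    (ks.foldl pvStep (([] : PySem.Set String), ([] : PySem.Set String))).1 = PySem.Set.ofList ks
    ∧ (∀ k, k ∈ (ks.foldl pvStep (([] : PySem.Set String), ([] : PySem.Set String))).2 ↔ 2 ≤ ks.count k)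
    ∧ 10 * ((ks.length : Int)
        - ((ks.foldl pvStep (([] : PySem.Set String), ([] : PySem.Set String))).1.length : Int)
        - ((ks.foldl pvStep (([] : PySem.Set String), ([] : PySem.Set String))).2.length : Int))
      = pvM ks := by
  induction ks using List.reverseRecOn with
  | nil => refine ⟨rfl, by simp [pvM], by simp [pvM]⟩
  | append_singleton t x ih =>
    obtain ⟨hseen, hrep, hval⟩ := ih
    rw [List.foldl_append] at *
    simp only [List.foldl_cons, List.foldl_nil]
    set st := t.foldl pvStep (([] : PySem.Set String), ([] : PySem.Set String)) with hst
    have hcontains : PySem.Set.contains st.1 x = decide (x ∈ PySem.Set.ofList t) := by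
      rw [hseen]; simp [PySem.Set.contains_eq_listContains]
    by_cases hx : x ∈ PySem.Set.ofList t
    · have hxt : x ∈ t := (PySem.Set.mem_ofList t x).mp hx
      have hc1 : 1 ≤ t.count x := List.count_pos_iff.mpr hxt
      have hstep : pvStep st x = (st.1, PySem.Set.add st.2 x) := by
        unfold pvStep; rw [hcontains]; simp [hx]
      rw [hstep]
      have hofl : PySem.Set.ofList (t ++ [x]) = PySem.Set.ofList t := by
        rw [PySem.Set.ofList_append_singleton, PySem.Set.add_of_mem hx]
      refine ⟨by simp [hofl, hseen], ?_, ?_⟩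
      · intro k
        rw [PySem.Set.mem_add, hrep, List.count_append]
        by_cases hk : k = x
        · subst hk; simp; omega
        · have h0 : List.count k [x] = 0 := List.count_eq_zero.mpr (by simp [hk])
          simp [h0, hk]
      · by_cases h2 : 2 ≤ t.count x
        · -- x already repeated: both sets unchanged, pvM grows by 10
          have hxrep : x ∈ st.2 := (hrep x).mpr h2
          rw [PySem.Set.add_of_mem hxrep, pvM_append, if_pos (by exact_mod_cast by omega),
            ← hval, hseen]
          simp only [List.length_append, List.length_singleton]
          push_cast; ring
        · -- second occurrence: repeated grows by 1, pvM unchanged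
          have hxrep : x ∉ st.2 := fun h => h2 ((hrep x).mp h)
          rw [PySem.Set.add_of_not_mem hxrep, pvM_append,
            if_neg (by exact_mod_cast by omega), ← hval, hseen]
          simp only [List.length_append, List.length_singleton]
          push_cast; ring
    · have hxt : x ∉ t := fun h => hx ((PySem.Set.mem_ofList t x).mpr h)
      have hc0 : t.count x = 0 := List.count_eq_zero.mpr hxt
      have hstep : pvStep st x = (PySem.Set.add st.1 x, st.2) := by
        unfold pvStep; rw [hcontains]; simp [hx]
      rw [hstep]
      have hxseen : x ∉ st.1 := by rw [hseen]; exact hx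
      have hlen : (PySem.Set.add st.1 x).length = st.1.length + 1 := by
        rw [PySem.Set.add_of_not_mem hxseen]; simp
      refine ⟨?_, ?_, ?_⟩
      · show PySem.Set.add st.1 x = PySem.Set.ofList (t ++ [x])
        rw [PySem.Set.ofList_append_singleton, ← hseen]
      · intro k
        show k ∈ st.2 ↔ _
        rw [hrep, List.count_append]
        by_cases hk : k = x
        · subst hk; simp [hc0]
        · have h0 : List.count k [x] = 0 := List.count_eq_zero.mpr (by simp [hk])
          simp [h0]
      · show 10 * ((((t ++ [x]).length : Int)) - ((PySem.Set.add st.1 x).length : Int)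
            - ((st.2.length : Int))) = pvM (t ++ [x])
        rw [pvM_append, if_neg (by exact_mod_cast by omega), ← hval, hlen]
        simp only [List.length_append, List.length_singleton]
        push_cast; ring

theorem pvA_eq (students : List (List (String × String))) :
    school_score students = pvM (students.map pvKey) := by
  unfold school_score
  have h1 : (students.foldl
      (fun school_counts student =>
        school_counts.insert (((PySem.Dict.mk student).get? "School").getD "")
          (school_counts.getD (((PySem.Dict.mk student).get? "School").getD "") 0 + 1))
      (PySem.Dict.empty : PySem.Dict String Int))
    = (students.map pvKey).foldl (fun d x => d.insert x (d.getD x 0 + 1))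
      (PySem.Dict.empty : PySem.Dict String Int) := by
    rw [List.foldl_map]; rfl
  rw [h1, PySem.Dict.foldl_insert_getD_add_one_eq_counter]
  have h2 : (PySem.Dict.values (PySem.Dict.counter (students.map pvKey)))
      = (PySem.Set.ofList (students.map pvKey)).map (fun k => ((students.map pvKey).count k : Int)) := by
    simp only [PySem.Dict.values, PySem.Dict.items_counter, List.map_map]
    rfl
  rw [h2, pvSumG]
  simp [pvM, List.map_map]
  rfl

theorem pvB_eq (students : List (List (String × String))) :
    school_score_alt students = pvM (students.map pvKey) := by
  unfold school_score_alt
  have h1 : (students.foldl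
      (fun st student =>
        let name := ((PySem.Dict.mk student).get? "School").getD ""
        if PySem.Set.contains st.1 name then (st.1, PySem.Set.add st.2 name)
        else (PySem.Set.add st.1 name, st.2))
      (([] : PySem.Set String), ([] : PySem.Set String)))
    = (students.map pvKey).foldl pvStep (([] : PySem.Set String), ([] : PySem.Set String)) := by
    rw [List.foldl_map]; rfl
  obtain ⟨_, _, hval⟩ := pvB_fold (students.map pvKey)
  simp only [h1, PySem.Set.len]
  rw [← hval]
  simp

-- ===== VERDICT (by name: the statement is the Claim_ definition above) =====
theorem school_score_spec : Claim_equal_school_score := by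
  intro students _ _
  unfold Spec_school_score
  rw [pvA_eq, pvB_eq]
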